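-- pv_equiv track=rewrite | github.com/Hexx98/nova | backend/app/tasks/recon.py | _target_in_scope
-- ===== SOURCE A (Python) =====
-- def _target_in_scope(target: str, scope: dict) -> bool:
--     entries = scope.get("entries", [])
--     for entry in entries:
--         entry_target = entry.get("target", "").lower().strip()
--         t = target.lower().strip()
--         # Domain match: exact or subdomain
--         if t == entry_target or t.endswith("." + entry_target):
--             return True
--     return False
-- ===== SOURCE B (Python) =====
-- def _target_in_scope(target: str, scope: dict) -> bool:
--     entries = scope.get("entries", [])
--     t = target.lower().strip()
--     s = {e.get("target", "").lower().strip() for e in entries}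
--     cands = [t] + [t[i + 1:] for i, c in enumerate(t) if c == '.']
--     return any(c in s for c in cands)
-- ===== Notes on version B (the rewrite author's own statement) =====
-- stated objective: alternative
-- what changed: Instead of scanning entries and testing t == e or t.endswith('.'+e) per entry, B builds a set of normalized entry targets once and checks whether t or any of its after-a-dot suffixes is in that set.
import Mathlib
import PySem

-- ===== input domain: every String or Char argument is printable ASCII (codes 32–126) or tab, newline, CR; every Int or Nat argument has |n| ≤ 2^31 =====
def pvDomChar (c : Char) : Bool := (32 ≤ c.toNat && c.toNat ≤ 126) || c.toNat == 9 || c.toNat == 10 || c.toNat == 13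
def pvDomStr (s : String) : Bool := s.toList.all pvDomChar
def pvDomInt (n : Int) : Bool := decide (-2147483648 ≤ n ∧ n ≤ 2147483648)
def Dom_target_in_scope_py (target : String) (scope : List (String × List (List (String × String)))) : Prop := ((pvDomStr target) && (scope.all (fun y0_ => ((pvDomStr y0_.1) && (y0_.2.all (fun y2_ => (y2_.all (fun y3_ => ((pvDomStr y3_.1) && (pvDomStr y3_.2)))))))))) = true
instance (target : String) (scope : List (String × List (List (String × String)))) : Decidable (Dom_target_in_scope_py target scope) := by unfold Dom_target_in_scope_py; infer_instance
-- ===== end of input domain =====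

-- B builds a set of normalized entry targets once and intersects it with t's dot-suffix
-- candidates, instead of A's per-entry equality/endswith test (objective: alternative).

-- ===== PORT A =====
-- the for-loop over entries with early return True
def tisLoopA (target : String) : List (List (String × String)) → Bool
  | [] => false
  | entry :: rest =>
    let entry_target := PySem.Str.strip (PySem.Str.lower ((PySem.Dict.mk entry).getD "target" ""))
    let t := PySem.Str.strip (PySem.Str.lower target)
    if t == entry_target || PySem.Str.endswith t ("." ++ entry_target) then true
    else tisLoopA target rest

def target_in_scope_py (target : String) (scope : List (String × List (List (String × String)))) : Bool :=
  let entries := (PySem.Dict.mk scope).getD "entries" []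
  tisLoopA target entries

-- ===== PORT B =====
def target_in_scope_py_alt (target : String) (scope : List (String × List (List (String × String)))) : Bool :=
  let entries := (PySem.Dict.mk scope).getD "entries" []
  let t := PySem.Str.strip (PySem.Str.lower target)
  let s := PySem.Set.ofList (entries.map (fun e => PySem.Str.strip (PySem.Str.lower ((PySem.Dict.mk e).getD "target" ""))))
  let cands := t :: ((PySem.List.enumerate t.toList).filterMap
      (fun p => if p.2 == '.' then some (PySem.Str.slice t (some (p.1 + 1)) none) else none))
  cands.any (fun c => PySem.Set.contains s c)

-- ===== PRECONDITION & SPEC =====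
def Spec_target_in_scope_py (target : String) (scope : List (String × List (List (String × String)))) (out : Bool) : Prop := out = target_in_scope_py_alt target scope
instance (target : String) (scope : List (String × List (List (String × String)))) (out : Bool) : Decidable (Spec_target_in_scope_py target scope out) := by unfold Spec_target_in_scope_py; infer_instance

-- ===== CLAIM (what is proved, stated in full; the proofs are below) =====
def Claim_equal_target_in_scope_py : Prop := ∀ (target : String) (scope : List (String × List (List (String × String)))), Dom_target_in_scope_py target scope → Spec_target_in_scope_py target scope (target_in_scope_py target scope)

-- ===== LEMMAS AND PROOFS =====

-- A's loop is the 'any' of the per-entry match over the entries list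
theorem tisLoopA_eq_any (target : String) (es : List (List (String × String))) :
    tisLoopA target es = es.any (fun entry =>
      PySem.Str.strip (PySem.Str.lower target) == PySem.Str.strip (PySem.Str.lower ((PySem.Dict.mk entry).getD "target" "")) ||
      PySem.Str.endswith (PySem.Str.strip (PySem.Str.lower target)) ("." ++ PySem.Str.strip (PySem.Str.lower ((PySem.Dict.mk entry).getD "target" "")))) := by
  induction es with
  | nil => rfl
  | cons e rest ih =>
    simp only [tisLoopA, List.any_cons, ← ih]
    cases h : (PySem.Str.strip (PySem.Str.lower target) == PySem.Str.strip (PySem.Str.lower ((PySem.Dict.mk e).getD "target" "")) ||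
      PySem.Str.endswith (PySem.Str.strip (PySem.Str.lower target)) ("." ++ PySem.Str.strip (PySem.Str.lower ((PySem.Dict.mk e).getD "target" "")))) <;>
      simp

-- endswith('.'+et) on the string side, as a list-suffix statement
theorem endswith_dot_iff (t et : String) :
    PySem.Str.endswith t ("." ++ et) = true ↔ ('.' :: et.toList) <:+ t.toList := by
  rw [show PySem.Str.endswith t ("." ++ et) = PySem.Chars.endswith t.toList ("." ++ et).toList by simp]
  rw [PySem.Chars.endswith_iff]
  simp

-- '.'++et is a suffix of t  ↔  et is t[i+1:] for some dot position i
theorem dot_suffix_iff (tc et : List Char) :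
    (('.' :: et) <:+ tc) ↔ ∃ k : Nat, k < tc.length ∧ tc[k]? = some '.' ∧ tc.drop (k + 1) = et := by
  constructor
  · rintro ⟨pre, hpre⟩
    have hdk : tc.drop pre.length = '.' :: et := by rw [← hpre]; exact List.drop_left
    refine ⟨pre.length, ?_, ?_, ?_⟩
    · subst hpre; simp
    · subst hpre; simp
    · rw [← List.tail_drop, hdk]; rfl
  · rintro ⟨k, hk, hget, hdrop⟩
    refine ⟨tc.take k, ?_⟩
    have hcons : tc.drop k = '.' :: et := by
      rw [List.drop_eq_getElem_cons hk, hdrop]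
      simp only [List.getElem?_eq_getElem hk, Option.some.injEq] at hget
      simp [hget]
    rw [← hcons, List.take_append_drop]

-- membership in B's candidate list ↔ A's per-entry boolean test
theorem mem_cands_iff (t et : String) :
    (et ∈ t :: ((PySem.List.enumerate t.toList).filterMap
      (fun p => if p.2 == '.' then some (PySem.Str.slice t (some (p.1 + 1)) none) else none))) ↔
    (t == et || PySem.Str.endswith t ("." ++ et)) = true := by
  simp only [List.mem_cons, List.mem_filterMap, Bool.or_eq_true, beq_iff_eq]
  constructor
  · rintro (h | ⟨p, hp, hf⟩)
    · exact Or.inl h.symm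
    · right
      rw [PySem.List.mem_enumerate_iff] at hp
      obtain ⟨k, hk, rfl⟩ := hp
      split_ifs at hf with hdot
      · simp only [Option.some.injEq] at hf
        have hslice : (PySem.Str.slice t (some ((0 : Int) + k + 1)) none).toList = t.toList.drop (k + 1) := by
          simp only [PySem.Str.toList_slice, PySem.Chars.slice_eq_listSlice]
          rw [show (0 : Int) + k + 1 = ((k + 1 : Nat) : Int) by push_cast; ring]
          exact PySem.List.slice_from_natCast t.toList (k + 1)
        have het : et.toList = t.toList.drop (k + 1) := by rw [← hf]; exact hslice
        exact (endswith_dot_iff t et).mpr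
          ((dot_suffix_iff t.toList et.toList).mpr
            ⟨k, hk, by simp only [List.getElem?_eq_getElem hk, Option.some.injEq]; exact hdot, het.symm⟩)
  · rintro (h | h)
    · exact Or.inl h.symm
    · right
      obtain ⟨k, hk, hget, hdrop⟩ :=
        (dot_suffix_iff t.toList et.toList).mp ((endswith_dot_iff t et).mp h)
      have hdot : t.toList[k] = '.' := by
        simpa [List.getElem?_eq_getElem hk] using hget
      refine ⟨((0 : Int) + k, t.toList[k]), ?_, ?_⟩
      · rw [PySem.List.mem_enumerate_iff]; exact ⟨k, hk, rfl⟩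
      · simp only [hdot, if_pos]
        congr 1
        apply String.toList_injective
        simp only [PySem.Str.toList_slice, PySem.Chars.slice_eq_listSlice]
        rw [show (0 : Int) + k + 1 = ((k + 1 : Nat) : Int) by push_cast; ring]
        rw [PySem.List.slice_from_natCast t.toList (k + 1), hdrop]

-- Set.contains on a set built from a list tests list membership
theorem contains_ofList_iff {α : Type} [BEq α] [LawfulBEq α] (xs : List α) (x : α) :
    PySem.Set.contains (PySem.Set.ofList xs) x = true ↔ x ∈ xs := by
  simp [PySem.Set.contains, PySem.Set.mem_ofList]

-- ===== VERDICT (by name: the statement is the Claim_ definition above) =====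
theorem target_in_scope_py_spec : Claim_equal_target_in_scope_py := by
  intro target scope _
  unfold Spec_target_in_scope_py target_in_scope_py target_in_scope_py_alt
  simp only [tisLoopA_eq_any]
  rw [Bool.eq_iff_iff, List.any_eq_true, List.any_eq_true]
  constructor
  · rintro ⟨entry, hmem, hmatch⟩
    refine ⟨PySem.Str.strip (PySem.Str.lower ((PySem.Dict.mk entry).getD "target" "")),
      (mem_cands_iff _ _).mpr hmatch, ?_⟩
    exact (contains_ofList_iff _ _).mpr (List.mem_map.mpr ⟨entry, hmem, rfl⟩)
  · rintro ⟨c, hc, hin⟩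
    obtain ⟨entry, hmem, hnorm⟩ := List.mem_map.mp ((contains_ofList_iff _ _).mp hin)
    exact ⟨entry, hmem, by simpa [hnorm] using (mem_cands_iff _ c).mp hc⟩
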